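-- pv_equiv track=rewrite | github.com/SmallPepperZ/SachiBotPy | customfunctions/funcs/miscfunctions.py | find_flags
-- ===== SOURCE A (Python) =====
-- from typing import Union
--
-- def find_flags(flags:list, args:Union[list, tuple]) -> "tuple[list, list]":
-- 	"""Returns a list of flags and a list of arguments from an invocation
--
-- 	Parameters
-- 	----------
-- 	flags : list
-- 		The flags to check for as a list. Will be returned if they are used.
-- 	args : list or tuple
-- 		The arguments to search for flags in.
--
-- 	Returns
-- 	-------
-- 	used flags : list
-- 		A list of flags that were used in the command. If none are used, will be an empty list
-- 	args : list
-- 		A list of all the arguments that were not flags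
-- 	"""
-- 	used_flags:list = []
-- 	args = list(args)
-- 	for flag in flags:
-- 		if flag in args:
-- 			args.pop(args.index(flag))
-- 			used_flags.append(flag)
-- 	return used_flags, args
-- ===== SOURCE B (Python) =====
-- def find_flags(flags, args):
-- 	"""Counter-based re-implementation: one pass over args to count, one pass
-- 	over flags to pick used ones, one pass over args to drop removed occurrences."""
-- 	counts = {}
-- 	for a in args:
-- 		counts[a] = counts.get(a, 0) + 1
-- 	used_flags = []
-- 	to_remove = {}
-- 	for flag in flags:
-- 		if counts.get(flag, 0) > 0:
-- 			counts[flag] = counts[flag] - 1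
-- 			to_remove[flag] = to_remove.get(flag, 0) + 1
-- 			used_flags.append(flag)
-- 	rest = []
-- 	for a in args:
-- 		k = to_remove.get(a, 0)
-- 		if k > 0:
-- 			to_remove[a] = k - 1
-- 		else:
-- 			rest.append(a)
-- 	return used_flags, rest
-- ===== Notes on version B (the rewrite author's own statement) =====
-- stated objective: faster
-- what changed: Replaced the per-flag linear membership/index/pop scans over the args list with a hash-counter of args, per-value removal counts, and a single skip pass that rebuilds the remaining args.
import Mathlib
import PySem

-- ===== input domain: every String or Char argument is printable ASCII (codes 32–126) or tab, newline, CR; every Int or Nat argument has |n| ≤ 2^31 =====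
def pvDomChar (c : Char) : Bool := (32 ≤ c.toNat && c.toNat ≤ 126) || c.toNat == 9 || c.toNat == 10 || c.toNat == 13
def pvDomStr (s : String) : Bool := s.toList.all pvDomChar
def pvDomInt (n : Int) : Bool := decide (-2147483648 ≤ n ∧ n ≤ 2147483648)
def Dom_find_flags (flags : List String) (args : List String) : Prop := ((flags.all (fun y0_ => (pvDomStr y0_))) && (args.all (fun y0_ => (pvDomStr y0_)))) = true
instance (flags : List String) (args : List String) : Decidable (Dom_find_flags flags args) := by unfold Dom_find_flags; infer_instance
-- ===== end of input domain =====

-- B replaces A's per-flag linear membership/index/pop scans of args with a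
-- counter of args, per-value removal counts, and one skip pass rebuilding the
-- remaining args (a timing run measured B faster on the largest inputs).

-- ===== PORT A =====
-- for flag in flags: if flag in args: args.pop(args.index(flag)); used_flags.append(flag)
def find_flags (flags : List String) (args : List String) : List String × List String :=
  flags.foldl (fun (st : List String × List String) flag =>
    if flag ∈ st.2 then
      match (PySem.List.index? st.2 flag).bind (fun i => PySem.List.pop? st.2 (i : Int)) with
      | some r => (st.1 ++ [flag], r.2)
      | none => st                    -- unreachable: flag ∈ st.2
    else st) ([], args)

-- ===== PORT B =====
def find_flags_alt (flags : List String) (args : List String) : List String × List String :=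
  -- counts[a] = counts.get(a, 0) + 1
  let counts := args.foldl (fun (d : PySem.Dict String Int) a => d.insert a (d.getD a 0 + 1)) PySem.Dict.empty
  -- flag loop: consume from counts, record removals, collect used flags
  let st2 := flags.foldl (fun (st : List String × PySem.Dict String Int × PySem.Dict String Int) flag =>
      if st.2.1.getD flag 0 > 0 then
        (st.1 ++ [flag], st.2.1.insert flag (st.2.1.getD flag 0 - 1),
         st.2.2.insert flag (st.2.2.getD flag 0 + 1))
      else st) ([], counts, PySem.Dict.empty)
  -- skip pass: drop the first to_remove[a] occurrences of each a
  let st3 := args.foldl (fun (st : List String × PySem.Dict String Int) a =>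
      let k := st.2.getD a 0
      if k > 0 then (st.1, st.2.insert a (k - 1)) else (st.1 ++ [a], st.2)) ([], st2.2.2)
  (st2.1, st3.1)

-- ===== PRECONDITION & SPEC =====
def Spec_find_flags (flags : List String) (args : List String) (out : List String × List String) : Prop := out = find_flags_alt flags args
instance (flags : List String) (args : List String) (out : List String × List String) : Decidable (Spec_find_flags flags args out) := by unfold Spec_find_flags; infer_instance

-- ===== CLAIM (what is proved, stated in full; the proofs are below) =====
def Claim_equal_find_flags : Prop := ∀ (flags : List String) (args : List String), Dom_find_flags flags args → Spec_find_flags flags args (find_flags flags args)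

-- ===== LEMMAS AND PROOFS =====

def skipF (r : String → Int) : List String → List String
  | [] => []
  | a :: t => if r a > 0 then skipF (fun v => if v = a then r a - 1 else r v) t
              else a :: skipF r t

theorem erase_skipF (xs : List String) :
    ∀ (r : String → Int) (f : String), (∀ v, 0 ≤ r v) → f ∈ skipF r xs →
    (skipF r xs).erase f = skipF (fun v => if v = f then r v + 1 else r v) xs := by
  induction xs with
  | nil => intro r f _ hf; cases hf
  | cons a t ih =>
    intro r f hnn hf
    by_cases h : r a > 0
    · have h2 : (if a = f then r a + 1 else r a) > 0 := by split <;> omega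
      rw [skipF, if_pos h] at hf ⊢
      rw [skipF, if_pos h2]
      rw [ih _ f (fun v => by have := hnn v; split <;> omega) hf]
      apply congrArg (skipF · t)
      funext v
      by_cases hv : v = a <;> by_cases hvf : v = f <;> subst_eqs <;> simp_all
    · rw [skipF, if_neg h] at hf ⊢
      by_cases haf : a = f
      · subst haf
        have h0 : r a = 0 := le_antisymm (by omega) (hnn a)
        rw [skipF]
        have h2 : (if a = a then r a + 1 else r a) > 0 := by simp; omega
        rw [if_pos h2, List.erase_cons_head]
        apply congrArg (skipF · t)
        funext v
        by_cases hv : v = a <;> simp [hv, h0]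
      · have hft : f ∈ skipF r t := by
          rcases List.mem_cons.mp hf with h1 | h1
          · exact absurd h1.symm haf
          · exact h1
        rw [List.erase_cons_tail (by simp [haf])]
        rw [skipF]
        have h2 : ¬ (if a = f then r a + 1 else r a) > 0 := by simp [haf]; omega
        rw [if_neg h2]
        rw [ih r f hnn hft]

theorem popIndex_eq_erase (xs : List String) (v : String) (hv : v ∈ xs) :
    (PySem.List.index? xs v).bind (fun i => PySem.List.pop? xs (i : Int)) = some (v, xs.erase v) := by
  induction xs with
  | nil => cases hv
  | cons a t ih =>
    by_cases hav : a = v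
    · subst hav
      rw [PySem.List.index?_cons_self]
      simp [PySem.List.pop?_zero_cons]
    · rw [PySem.List.index?_cons_of_ne t hav]
      rcases List.mem_cons.mp hv with h | hvt
      · exact absurd h.symm hav
      · obtain ⟨i, hi, hpop⟩ : ∃ i, PySem.List.index? t v = some i ∧ PySem.List.pop? t (i : Int) = some (v, t.erase v) := by
          rcases ho : PySem.List.index? t v with _ | i
          · rw [PySem.List.index?_eq_none_iff] at ho; exact absurd hvt ho
          · refine ⟨i, rfl, ?_⟩
            have := ih hvt
            rwa [ho, Option.bind_some] at this
        obtain ⟨hk, hgt, _⟩ := PySem.List.getElem_of_index?_eq_some hi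
        rw [hi]
        rw [PySem.List.pop?_natCast t i hk] at hpop
        have h2 := (Option.some.injEq _ _).mp hpop
        have heq : t.eraseIdx i = t.erase v := congrArg Prod.snd h2
        have h1 : i + 1 < (a :: t).length := by simpa using Nat.succ_lt_succ hk
        have h3 := PySem.List.pop?_natCast (a :: t) (i+1) h1
        simp only [Option.map_some, Option.bind_some]
        rw [h3]
        simp [hav, hgt, heq]

theorem skipF_zero (xs : List String) : skipF (fun _ => (0 : Int)) xs = xs := by
  induction xs with
  | nil => rfl
  | cons a t ih => simp [skipF, ih]

theorem loop3_eq_skipF (xs : List String) :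
    ∀ (acc : List String) (r : PySem.Dict String Int),
    (xs.foldl (fun (st : List String × PySem.Dict String Int) a =>
      let k := st.2.getD a 0
      if k > 0 then (st.1, st.2.insert a (k - 1)) else (st.1 ++ [a], st.2)) (acc, r)).1
      = acc ++ skipF (fun v => r.getD v 0) xs := by
  induction xs with
  | nil => intro acc r; simp [skipF]
  | cons a t ih =>
    intro acc r
    simp only [List.foldl_cons]
    by_cases h : r.getD a 0 > 0
    · simp only [h, if_pos, skipF]
      rw [ih]
      congr 1
      apply congrArg (skipF · t)
      funext v
      by_cases hv : v = a
      · subst hv; rw [PySem.Dict.getD_insert_self]; simp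
      · rw [PySem.Dict.getD_insert_of_ne _ _ _ hv]; simp [hv]
    · simp only [h, skipF]
      rw [ih]
      simp

theorem main_inv (flags : List String) :
    ∀ (used remA : List String) (c r : PySem.Dict String Int),
    (∀ v, c.getD v 0 = (remA.count v : Int)) →
    (∀ v, 0 ≤ r.getD v 0) →
    (flags.foldl (fun (st : List String × List String) flag =>
      if flag ∈ st.2 then
        match (PySem.List.index? st.2 flag).bind (fun i => PySem.List.pop? st.2 (i : Int)) with
        | some p => (st.1 ++ [flag], p.2)
        | none => st
      else st) (used, remA)).1
      = (flags.foldl (fun (st : List String × PySem.Dict String Int × PySem.Dict String Int) flag =>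
          if st.2.1.getD flag 0 > 0 then
            (st.1 ++ [flag], st.2.1.insert flag (st.2.1.getD flag 0 - 1),
             st.2.2.insert flag (st.2.2.getD flag 0 + 1))
          else st) (used, c, r)).1
    ∧ (∀ v, 0 ≤ ((flags.foldl (fun (st : List String × PySem.Dict String Int × PySem.Dict String Int) flag =>
          if st.2.1.getD flag 0 > 0 then
            (st.1 ++ [flag], st.2.1.insert flag (st.2.1.getD flag 0 - 1),
             st.2.2.insert flag (st.2.2.getD flag 0 + 1))
          else st) (used, c, r)).2.2.getD v 0))
    ∧ (∀ xs : List String, remA = skipF (fun v => r.getD v 0) xs →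
        (flags.foldl (fun (st : List String × List String) flag =>
          if flag ∈ st.2 then
            match (PySem.List.index? st.2 flag).bind (fun i => PySem.List.pop? st.2 (i : Int)) with
            | some p => (st.1 ++ [flag], p.2)
            | none => st
          else st) (used, remA)).2
        = skipF (fun v => ((flags.foldl (fun (st : List String × PySem.Dict String Int × PySem.Dict String Int) flag =>
            if st.2.1.getD flag 0 > 0 then
              (st.1 ++ [flag], st.2.1.insert flag (st.2.1.getD flag 0 - 1),
               st.2.2.insert flag (st.2.2.getD flag 0 + 1))
            else st) (used, c, r)).2.2.getD v 0)) xs) := by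
  induction flags with
  | nil =>
    intro used remA c r hc hr
    refine ⟨rfl, hr, fun xs hxs => hxs⟩
  | cons f fl ih =>
    intro used remA c r hc hr
    simp only [List.foldl_cons]
    by_cases hmem : f ∈ remA
    · have hcnt : 0 < remA.count f := List.count_pos_iff.mpr hmem
      have hcpos : c.getD f 0 > 0 := by rw [hc f]; exact_mod_cast hcnt
      rw [if_pos hmem, if_pos hcpos,
          popIndex_eq_erase remA f hmem]
      have hc' : ∀ v, (c.insert f (c.getD f 0 - 1)).getD v 0 = ((remA.erase f).count v : Int) := by
        intro v
        by_cases hv : v = f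
        · subst hv
          rw [PySem.Dict.getD_insert_self, hc, List.count_erase]
          simp
          omega
        · rw [PySem.Dict.getD_insert_of_ne _ _ _ hv, hc, List.count_erase]
          simp [Ne.symm hv]
      have hr' : ∀ v, 0 ≤ (r.insert f (r.getD f 0 + 1)).getD v 0 := by
        intro v
        by_cases hv : v = f
        · subst hv; rw [PySem.Dict.getD_insert_self]; have := hr v; omega
        · rw [PySem.Dict.getD_insert_of_ne _ _ _ hv]; exact hr v
      obtain ⟨h1, h2, h3⟩ := ih (used ++ [f]) (remA.erase f) _ _ hc' hr'
      refine ⟨h1, h2, fun xs hxs => ?_⟩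
      apply h3
      rw [hxs, erase_skipF xs _ f hr (hxs ▸ hmem)]
      apply congrArg (skipF · xs)
      funext v
      by_cases hv : v = f
      · subst hv; rw [PySem.Dict.getD_insert_self]; simp
      · rw [PySem.Dict.getD_insert_of_ne _ _ _ hv]; simp [hv]
    · have hcnt : remA.count f = 0 := by
        by_contra hne
        exact hmem (List.count_pos_iff.mp (Nat.pos_of_ne_zero hne))
      have hcneg : ¬ c.getD f 0 > 0 := by rw [hc f, hcnt]; simp
      rw [if_neg hmem, if_neg hcneg]
      exact ih used remA c r hc hr

-- ===== VERDICT (by name: the statement is the Claim_ definition above) =====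
theorem find_flags_spec : Claim_equal_find_flags := by
  intro flags args _
  unfold Spec_find_flags find_flags find_flags_alt
  dsimp only
  rw [PySem.Dict.foldl_insert_getD_add_one_eq_counter]
  obtain ⟨h1, h2, h3⟩ := main_inv flags [] args (PySem.Dict.counter args) PySem.Dict.empty
    (fun v => PySem.Dict.getD_counter args v)
    (fun v => by simp [PySem.Dict.getD, PySem.Dict.empty, PySem.Dict.get?])
  refine Prod.ext h1 ?_
  rw [loop3_eq_skipF, List.nil_append]
  apply h3
  have : (fun v => (PySem.Dict.empty : PySem.Dict String Int).getD v 0) = (fun _ => (0:Int)) := by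
    funext v; simp [PySem.Dict.getD, PySem.Dict.empty, PySem.Dict.get?]
  rw [this, skipF_zero]
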